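-- pv_equiv track=rewrite | github.com/fabischw/ppp-2023 | Exercises/PaulSeidel/PSeidel_exercises_03.py | num_counter
-- ===== SOURCE A (Python) =====
-- def num_counter(min, max):
--     """returns the number of integers, that are between the
--     min and max bounds and meet the given criteria"""
--     counter = 0
--     for i in range(min, max):   # includes min, excludes max
--         if is_String_sorted(i):
--             temp1 = str(i)
--             num = []
--             for j in range(10): # creating a list that saves every number's count
--                 j_as_str = str(j)
--                 num.append(temp1.count(j_as_str))
--             if num.count(2) != 0:
--                 counter += 1
--     return counter
--
-- def is_String_sorted(value = "nothing Given"):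
--     """Checks if the String, it needs as an argument, is in sorted.
--     The function only works with Strings made out of numbers completely!"""
--     str_value = str(value)  # to use string-operators in the following lines.
--     if str_value.isdigit == False:
--         raise ValueError("Argument has to be a number-filled String!")
--     else:
--         for counter in range(len(str_value)-1):
--             if str_value[counter] > str_value[counter+1]:
--                 return False
--         return True
-- ===== SOURCE B (Python) =====
-- def num_counter(min, max):
--     """returns the number of integers, that are between the
--     min and max bounds and meet the given criteria"""
--     counter = 0
--     for i in range(min, max):
--         if _sorted_with_pair(str(i)):
--             counter += 1
--     return counter
--
--
-- def _sorted_with_pair(s):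
--     """Single left-to-right scan: checks the string is sorted and,
--     tracking run lengths of equal characters, whether some character
--     occurs exactly twice (in a sorted string equal characters are
--     adjacent, so a count of two is a run of length two)."""
--     prev = s[0]
--     run = 1
--     has_pair = False
--     for c in s[1:]:
--         if prev > c:
--             return False
--         if c == prev:
--             run += 1
--         else:
--             if run == 2:
--                 has_pair = True
--             run = 1
--         prev = c
--     return has_pair or run == 2
-- ===== Notes on version B (the rewrite author's own statement) =====
-- stated objective: alternative
-- what changed: Per number, A scans the string for sortedness and then builds a 10-entry digit-count list via ten str.count passes plus a count(2) scan; B replaces all of that with a single left-to-right run-length scan of the string (in a sorted string equal characters are adjacent, so a digit count of two is a run of length two).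
import Mathlib
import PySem

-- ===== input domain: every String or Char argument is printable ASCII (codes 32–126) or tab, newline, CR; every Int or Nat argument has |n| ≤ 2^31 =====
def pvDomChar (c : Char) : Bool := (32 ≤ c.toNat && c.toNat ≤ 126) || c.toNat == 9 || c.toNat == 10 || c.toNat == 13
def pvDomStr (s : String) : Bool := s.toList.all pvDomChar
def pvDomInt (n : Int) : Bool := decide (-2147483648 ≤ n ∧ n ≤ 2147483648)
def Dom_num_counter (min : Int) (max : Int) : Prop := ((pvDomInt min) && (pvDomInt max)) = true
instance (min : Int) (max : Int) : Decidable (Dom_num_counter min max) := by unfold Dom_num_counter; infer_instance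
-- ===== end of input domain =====

-- B fuses A's per-number test (sortedness scan + ten per-digit count passes) into one
-- run-length scan of the digit string; an alternative of the same asymptotic cost.
-- ===== PORT A =====
-- port of is_String_sorted: the 'str_value.isdigit == False' branch compares a bound method
-- with False and never fires, so only the else branch (the adjacent-pair scan) is ported
def isStringSorted (cs : List Char) : Bool :=
  (PySem.List.pyRange 0 (PySem.List.len cs - 1) 1).all
    (fun k => !(decide (PySem.List.pyGetD cs k ' ' > PySem.List.pyGetD cs (k + 1) ' ')))

def num_counter (min : Int) (max : Int) : Int :=
  (PySem.List.pyRange min max 1).foldl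
    (fun counter i =>
      if isStringSorted (PySem.Int.toChars i) then
        let temp1 := PySem.Int.toChars i
        let num : List Int :=
          (PySem.List.pyRange 0 10 1).foldl
            (fun num j => num ++ [((PySem.Chars.count temp1 (PySem.Int.toChars j) : Int))]) []
        if num.count 2 ≠ 0 then counter + 1 else counter
      else counter) 0

-- ===== PORT B =====
-- port of _sorted_with_pair's loop: state (prev, run, has_pair), early `return False` on a descent
def pairScan : List Char → Char → Nat → Bool → Bool
  | [], _, run, hp => hp || run == 2
  | c :: rest, prev, run, hp =>
    if prev > c then false
    else if c == prev then pairScan rest c (run + 1) hp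
    else pairScan rest c 1 (hp || run == 2)

-- s[0]: str(i) is never empty, so the [] case is unreachable
def sortedWithPair (cs : List Char) : Bool :=
  match cs with
  | [] => false
  | c :: rest => pairScan rest c 1 false

def num_counter_alt (min : Int) (max : Int) : Int :=
  (PySem.List.pyRange min max 1).foldl
    (fun counter i => if sortedWithPair (PySem.Int.toChars i) then counter + 1 else counter) 0

-- ===== PRECONDITION & SPEC =====
def Spec_num_counter (min : Int) (max : Int) (out : Int) : Prop := out = num_counter_alt min max
instance (min : Int) (max : Int) (out : Int) : Decidable (Spec_num_counter min max out) := by unfold Spec_num_counter; infer_instance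

-- ===== CLAIM (what is proved, stated in full; the proofs are below) =====
def Claim_equal_num_counter : Prop := ∀ (min : Int) (max : Int), Dom_num_counter min max → Spec_num_counter min max (num_counter min max)

-- ===== LEMMAS AND PROOFS =====


theorem count_go_single (c : Char) : ∀ (s : List Char) (acc : Nat),
    PySem.Chars.count.go [c] s.length s acc = acc + s.count c
  | [], acc => by simp [PySem.Chars.count.go]
  | h :: t, acc => by
    rw [List.length_cons]
    rw [show PySem.Chars.count.go [c] (t.length + 1) (h :: t) acc
        = if List.isPrefixOf [c] (h :: t) then
            PySem.Chars.count.go [c] t.length (List.drop (List.length [c]) (h :: t)) (acc + 1)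
          else PySem.Chars.count.go [c] t.length t acc from rfl]
    by_cases hc : h = c
    · rw [if_pos (by simp [hc, List.isPrefixOf])]
      simp only [List.length_cons, List.length_nil, List.drop_succ_cons, List.drop_zero]
      rw [count_go_single c t (acc + 1), List.count_cons]
      simp [hc]; omega
    · rw [if_neg (by simp [List.isPrefixOf]; exact fun e => hc e.symm)]
      rw [count_go_single c t acc, List.count_cons]
      simp [hc]

theorem count_single (s : List Char) (c : Char) : PySem.Chars.count s [c] = s.count c := by
  rw [show PySem.Chars.count s [c] = PySem.Chars.count.go [c] s.length s 0 from rfl,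
    count_go_single c s 0, Nat.zero_add]

theorem isStringSorted_eq_chain (cs : List Char) :
    isStringSorted cs = decide (List.IsChain (· ≤ ·) cs) := by
  unfold isStringSorted
  rw [PySem.List.pyRange_one]
  have hlen : ((PySem.List.len cs - 1) - 0).toNat = cs.length - 1 := by
    simp [PySem.List.len_eq]
  rw [hlen]
  have hget : ∀ i : Nat, i + 1 ≤ cs.length - 1 + 1 → i + 1 ≤ cs.length →
      (PySem.List.pyGetD cs (0 + (i : Int)) ' ' = cs.getD i ' '
        ∧ PySem.List.pyGetD cs (0 + (i : Int) + 1) ' ' = cs.getD (i + 1) ' ') := by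
    intro i _ _
    constructor
    · rw [show (0 + (i : Int)) = ((i : Nat) : Int) by ring, PySem.List.pyGetD_natCast]
    · rw [show (0 + (i : Int) + 1) = ((i + 1 : Nat) : Int) by push_cast; ring,
        PySem.List.pyGetD_natCast]
  by_cases hch : List.IsChain (· ≤ ·) cs
  · rw [decide_eq_true hch]
    rw [List.isChain_iff_getElem] at hch
    rw [List.all_eq_true]
    intro x hx
    obtain ⟨i, hi, rfl⟩ := List.mem_map.1 hx
    rw [List.mem_range] at hi
    obtain ⟨h1, h2⟩ := hget i (by omega) (by omega)
    simp only [h1, h2, Bool.not_eq_true', decide_eq_false_iff_not, not_lt]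
    rw [List.getD_eq_getElem _ _ (by omega), List.getD_eq_getElem _ _ (by omega)]
    exact hch i (by omega)
  · rw [decide_eq_false hch]
    rw [List.isChain_iff_getElem] at hch
    push Not at hch
    obtain ⟨i, hi, hlt⟩ := hch
    rw [List.all_eq_false]
    refine ⟨(0 + (i : Int)), List.mem_map.2 ⟨i, List.mem_range.2 (by omega), rfl⟩, ?_⟩
    obtain ⟨h1, h2⟩ := hget i (by omega) (by omega)
    rw [List.getD_eq_getElem _ _ (by omega)] at h1
    rw [List.getD_eq_getElem _ _ (by omega)] at h2
    rw [Bool.not_eq_true, h1, h2]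
    simp [hlt]

theorem pairScan_false : ∀ (rest : List Char) (prev : Char) (run : Nat) (hp : Bool),
    ¬ List.IsChain (· ≤ ·) (prev :: rest) → pairScan rest prev run hp = false
  | [], prev, run, hp, h => absurd (List.isChain_singleton prev) h
  | c :: rest, prev, run, hp, h => by
    rw [pairScan]
    by_cases hgt : prev > c
    · simp [hgt]
    · rw [if_neg hgt]
      have hch : ¬ List.IsChain (· ≤ ·) (c :: rest) := by
        intro hc
        exact h (List.isChain_cons_cons.2 ⟨not_lt.1 hgt, hc⟩)
      by_cases he : c == prev
      · rw [if_pos he]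
        exact pairScan_false rest c (run + 1) hp hch
      · rw [if_neg he]
        exact pairScan_false rest c 1 (hp || run == 2) hch

theorem pairScan_sorted : ∀ (rest : List Char) (prev : Char) (run : Nat) (hp : Bool),
    List.IsChain (· ≤ ·) (prev :: rest) →
    (pairScan rest prev run hp = true ↔
      hp = true ∨ run + rest.count prev = 2 ∨ ∃ c ∈ rest, c ≠ prev ∧ rest.count c = 2)
  | [], prev, run, hp, _ => by simp [pairScan]
  | c :: rest, prev, run, hp, h => by
    have hpw : List.Pairwise (· ≤ ·) (prev :: c :: rest) := List.isChain_iff_pairwise.1 h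
    have hle : prev ≤ c := (List.isChain_cons_cons.1 h).1
    have hch : List.IsChain (· ≤ ·) (c :: rest) := (List.isChain_cons_cons.1 h).2
    rw [pairScan, if_neg (not_lt.2 hle)]
    by_cases he : c = prev
    · subst he
      rw [if_pos (by simp)]
      rw [pairScan_sorted rest c (run + 1) hp hch]
      constructor
      · rintro (h1 | h2 | ⟨c', hc', hne, hcnt⟩)
        · exact Or.inl h1
        · exact Or.inr (Or.inl (by rw [List.count_cons_self]; omega))
        · exact Or.inr (Or.inr ⟨c', by simp [hc'], hne, by rw [List.count_cons_of_ne (Ne.symm hne)]; exact hcnt⟩)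
      · rintro (h1 | h2 | ⟨c', hc', hne, hcnt⟩)
        · exact Or.inl h1
        · rw [List.count_cons_self] at h2; exact Or.inr (Or.inl (by omega))
        · have hc'' : c' ∈ rest := by
            rcases List.mem_cons.1 hc' with rfl | hm
            · exact absurd rfl hne
            · exact hm
          rw [List.count_cons_of_ne (Ne.symm hne)] at hcnt
          exact Or.inr (Or.inr ⟨c', hc'', hne, hcnt⟩)
    · have hlt : prev < c := lt_of_le_of_ne hle (fun e => he e.symm)
      rw [if_neg (by simp [he])]
      rw [pairScan_sorted rest c 1 (hp || run == 2) hch]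
      have hge : ∀ x ∈ rest, c ≤ x := (List.pairwise_cons.1 (List.isChain_iff_pairwise.1 hch)).1
      have hprev_not : prev ∉ c :: rest := by
        intro hm
        rcases List.mem_cons.1 hm with rfl | hm'
        · exact absurd rfl he
        · exact absurd (hge _ hm') (not_le.2 hlt)
      have hcount0 : (c :: rest).count prev = 0 := List.count_eq_zero.2 hprev_not
      constructor
      · rintro (h1 | h2 | ⟨c', hc', hne, hcnt⟩)
        · rcases Bool.or_eq_true_iff.1 h1 with h' | h'
          · exact Or.inl h'
          · refine Or.inr (Or.inl ?_)
            rw [hcount0]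
            have : run = 2 := by simpa using h'
            omega
        · refine Or.inr (Or.inr ⟨c, by simp, fun e => he e, ?_⟩)
          rw [List.count_cons_self]; omega
        · refine Or.inr (Or.inr ⟨c', by simp [hc'], ?_, ?_⟩)
          · intro e; subst e
            exact absurd (hge _ hc') (not_le.2 hlt)
          · rw [List.count_cons_of_ne (Ne.symm hne)]; exact hcnt
      · rintro (h1 | h2 | ⟨c', hc', hne, hcnt⟩)
        · exact Or.inl (by simp [h1])
        · rw [hcount0] at h2
          exact Or.inl (by simp; omega)
        · rcases List.mem_cons.1 hc' with rfl | hm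
          · rw [List.count_cons_self] at hcnt
            exact Or.inr (Or.inl (by omega))
          · by_cases hcc : c' = c
            · subst hcc
              rw [List.count_cons_self] at hcnt
              exact Or.inr (Or.inl (by omega))
            · rw [List.count_cons_of_ne (Ne.symm hcc)] at hcnt
              exact Or.inr (Or.inr ⟨c', hm, hcc, hcnt⟩)

def digitChars : List Char := ['0','1','2','3','4','5','6','7','8','9']

theorem toDigitsCore_mem : ∀ (fuel n : Nat) (acc : List Char),
    ∀ c ∈ Nat.toDigitsCore 10 fuel n acc, c ∈ digitChars ∨ c ∈ acc
  | 0, n, acc, c, hc => Or.inr hc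
  | fuel + 1, n, acc, c, hc => by
    rw [Nat.toDigitsCore] at hc
    have hd : (n % 10).digitChar ∈ digitChars := by
      have h10 : n % 10 < 10 := Nat.mod_lt _ (by norm_num)
      interval_cases h : n % 10 <;> decide
    by_cases h0 : n / 10 = 0
    · rw [if_pos h0] at hc
      rcases List.mem_cons.1 hc with rfl | hm
      · exact Or.inl hd
      · exact Or.inr hm
    · rw [if_neg h0] at hc
      rcases toDigitsCore_mem fuel (n / 10) _ c hc with h | h
      · exact Or.inl h
      · rcases List.mem_cons.1 h with rfl | hm
        · exact Or.inl hd
        · exact Or.inr hm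

theorem toDigitsCore_len : ∀ (fuel n : Nat) (acc : List Char),
    acc.length ≤ (Nat.toDigitsCore 10 fuel n acc).length
  | 0, n, acc => le_refl _
  | fuel + 1, n, acc => by
    rw [Nat.toDigitsCore]
    by_cases h0 : n / 10 = 0
    · rw [if_pos h0]; simp
    · rw [if_neg h0]
      calc acc.length ≤ ((n % 10).digitChar :: acc).length := by simp
        _ ≤ _ := toDigitsCore_len fuel (n / 10) _

theorem toDigits_ne_nil (n : Nat) : Nat.toDigits 10 n ≠ [] := by
  rw [Nat.toDigits, Nat.toDigitsCore]
  by_cases h0 : n / 10 = 0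
  · rw [if_pos h0]; simp
  · rw [if_neg h0]
    intro h
    have := toDigitsCore_len n (n / 10) [(n % 10).digitChar]
    rw [h] at this
    simp at this

theorem toDigits_mem (n : Nat) : ∀ c ∈ Nat.toDigits 10 n, c ∈ digitChars := by
  intro c hc
  rcases toDigitsCore_mem (n + 1) n [] c hc with h | h
  · exact h
  · simp at h


-- structure of str(i): nonempty, and every character is a digit except a single leading '-'
theorem toChars_ne_nil (i : Int) : PySem.Int.toChars i ≠ [] := by
  rw [PySem.Int.toChars]
  split
  · simp
  · exact toDigits_ne_nil _

theorem toChars_mem (i : Int) : ∀ c ∈ PySem.Int.toChars i, c ∈ digitChars ∨ c = '-' := by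
  rw [PySem.Int.toChars]
  split
  · intro c hc
    rcases List.mem_cons.1 hc with rfl | hm
    · exact Or.inr rfl
    · exact Or.inl (toDigits_mem _ c hm)
  · intro c hc
    exact Or.inl (toDigits_mem _ c hc)

theorem toChars_count_minus (i : Int) : (PySem.Int.toChars i).count '-' ≤ 1 := by
  have hdig : ∀ n : Nat, (Nat.toDigits 10 n).count '-' = 0 := by
    intro n
    rw [List.count_eq_zero]
    intro hm
    have := toDigits_mem n _ hm
    simp [digitChars] at this
  rw [PySem.Int.toChars]
  split
  · rw [List.count_cons_self, hdig]
  · rw [hdig]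
    omega

-- A's digit-count list condition, reduced to character counts
theorem numlist_iff (cs : List Char) :
    ((PySem.List.pyRange 0 10 1).foldl
        (fun num j => num ++ [((PySem.Chars.count cs (PySem.Int.toChars j) : Int))])
        ([] : List Int)).count 2 ≠ 0 ↔ ∃ c ∈ digitChars, cs.count c = 2 := by
  have hr : PySem.List.pyRange 0 10 1 = [0,1,2,3,4,5,6,7,8,9] := by decide
  rw [hr]
  simp only [List.foldl, List.nil_append, List.cons_append]
  rw [show PySem.Int.toChars 0 = ['0'] from rfl, show PySem.Int.toChars 1 = ['1'] from rfl,
    show PySem.Int.toChars 2 = ['2'] from rfl, show PySem.Int.toChars 3 = ['3'] from rfl,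
    show PySem.Int.toChars 4 = ['4'] from rfl, show PySem.Int.toChars 5 = ['5'] from rfl,
    show PySem.Int.toChars 6 = ['6'] from rfl, show PySem.Int.toChars 7 = ['7'] from rfl,
    show PySem.Int.toChars 8 = ['8'] from rfl, show PySem.Int.toChars 9 = ['9'] from rfl]
  simp only [count_single]
  rw [Ne, List.count_eq_zero]
  simp only [digitChars, List.mem_cons, List.not_mem_nil, or_false, not_not]
  constructor
  · intro h
    rcases h with h|h|h|h|h|h|h|h|h|h <;>
      [exact ⟨'0', by simp, by omega⟩; exact ⟨'1', by simp, by omega⟩; exact ⟨'2', by simp, by omega⟩;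
       exact ⟨'3', by simp, by omega⟩; exact ⟨'4', by simp, by omega⟩; exact ⟨'5', by simp, by omega⟩;
       exact ⟨'6', by simp, by omega⟩; exact ⟨'7', by simp, by omega⟩; exact ⟨'8', by simp, by omega⟩;
       exact ⟨'9', by simp, by omega⟩]
  · rintro ⟨c, hc, hcnt⟩
    rcases hc with rfl|rfl|rfl|rfl|rfl|rfl|rfl|rfl|rfl|rfl|h <;> simp_all

-- the two per-number tests agree on every str(i)
theorem elem_iff (i : Int) :
    (isStringSorted (PySem.Int.toChars i) = true ∧
      ∃ c ∈ digitChars, (PySem.Int.toChars i).count c = 2) ↔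
    sortedWithPair (PySem.Int.toChars i) = true := by
  rw [isStringSorted_eq_chain]
  rcases hcs : PySem.Int.toChars i with _ | ⟨c0, rest⟩
  · exact absurd hcs (toChars_ne_nil i)
  · rw [sortedWithPair]
    by_cases hch : List.IsChain (· ≤ ·) (c0 :: rest)
    · rw [pairScan_sorted rest c0 1 false hch]
      simp only [decide_eq_true hch, true_and, Bool.false_eq_true, false_or]
      have hmem : ∀ c ∈ c0 :: rest, c ∈ digitChars ∨ c = '-' := by rw [← hcs]; exact toChars_mem i
      have hminus : (c0 :: rest).count '-' ≤ 1 := by rw [← hcs]; exact toChars_count_minus i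
      constructor
      · rintro ⟨c, hcdig, hcnt⟩
        have hcmem : c ∈ c0 :: rest := List.count_pos_iff.1 (by omega)
        by_cases hc0 : c = c0
        · subst hc0
          rw [List.count_cons_self] at hcnt
          exact Or.inl (by omega)
        · have hcr : c ∈ rest := by
            rcases List.mem_cons.1 hcmem with rfl | hm
            · exact absurd rfl hc0
            · exact hm
          rw [List.count_cons_of_ne (Ne.symm hc0)] at hcnt
          exact Or.inr ⟨c, hcr, hc0, hcnt⟩
      · rintro (h1 | ⟨c, hcr, hne, hcnt⟩)
        · have hcnt : (c0 :: rest).count c0 = 2 := by rw [List.count_cons_self]; omega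
          have hdig : c0 ∈ digitChars := by
            rcases hmem c0 (by simp) with h | rfl
            · exact h
            · omega
          exact ⟨c0, hdig, hcnt⟩
        · have hcnt' : (c0 :: rest).count c = 2 := by
            rw [List.count_cons_of_ne (Ne.symm hne)]; exact hcnt
          have hdig : c ∈ digitChars := by
            rcases hmem c (by simp [hcr]) with h | rfl
            · exact h
            · omega
          exact ⟨c, hdig, hcnt'⟩
    · rw [pairScan_false rest c0 1 false hch]
      simp [hch]

-- ===== VERDICT (by name: the statement is the Claim_ definition above) =====
theorem num_counter_spec : Claim_equal_num_counter := by
  unfold Claim_equal_num_counter Spec_num_counter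
  intro mn mx _
  unfold num_counter num_counter_alt
  apply PySem.List.foldl_congr_mem
  intro counter i _
  by_cases hs : isStringSorted (PySem.Int.toChars i) = true
  · rw [if_pos hs]
    show (if ((PySem.List.pyRange 0 10 1).foldl
        (fun num j => num ++ [((PySem.Chars.count (PySem.Int.toChars i) (PySem.Int.toChars j) : Int))])
        ([] : List Int)).count 2 ≠ 0 then counter + 1 else counter) = _
    by_cases hn : ∃ c ∈ digitChars, (PySem.Int.toChars i).count c = 2
    · rw [if_pos ((numlist_iff _).2 hn), if_pos ((elem_iff i).1 ⟨hs, hn⟩)]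
    · rw [if_neg (fun h => hn ((numlist_iff _).1 h))]
      rw [if_neg (fun h => hn ((elem_iff i).2 h).2)]
  · rw [if_neg hs]
    rw [if_neg (fun h => hs ((elem_iff i).2 h).1)]
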